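-- pv_equiv track=rewrite | github.com/myenquiringmind/dev-standards-plugin | hooks/task_completed.py | _flip_in_task_progress
-- ===== SOURCE A (Python) =====
-- _SECTION_HEADING: str = "## Task Progress"
--
-- def _flip_in_task_progress(text: str, subject: str) -> str:
--     """Return *text* with the first matching ``- [ ] <subject>`` flipped to
--     ``- [x] <subject>`` inside the ``## Task Progress`` section.
--
--     Returns *text* unchanged if no matching pending line exists in the
--     section (already completed, never created, or section absent).
--     """
--     open_marker = f"- [ ] {subject}"
--     closed_marker = f"- [x] {subject}"
--
--     lines = text.splitlines()
--     section_start: int | None = None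
--     section_end = len(lines)
--
--     for i, line in enumerate(lines):
--         if line.strip() == _SECTION_HEADING:
--             section_start = i
--             continue
--         if section_start is not None and line.startswith("## "):
--             section_end = i
--             break
--
--     if section_start is None:
--         return text
--
--     for i in range(section_start + 1, section_end):
--         stripped = lines[i].rstrip()
--         if stripped == open_marker:
--             lines[i] = closed_marker
--             joined = "\n".join(lines)
--             return joined + "\n" if text.endswith("\n") else joined
--         if stripped == closed_marker:
--             return text  # Already completed — idempotent.
--
--     return text  # Subject not in section — do not invent a new line.
-- ===== SOURCE B (Python) =====
-- _SECTION_HEADING: str = "## Task Progress"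
--
-- def _flip_in_task_progress(text: str, subject: str) -> str:
--     """Single fused pass: a state machine over the lines records, per section,
--     the first pending/closed marker; one decision is applied at the end."""
--     open_marker = f"- [ ] {subject}"
--     closed_marker = f"- [x] {subject}"
--
--     lines = text.splitlines()
--     in_section = False
--     decision = None  # None | ('flip', i) | ('closed',)
--     for i, line in enumerate(lines):
--         if line.strip() == _SECTION_HEADING:
--             in_section = True
--             decision = None  # a later heading restarts the section
--         elif in_section and line.startswith("## "):
--             break
--         elif in_section and decision is None:
--             stripped = line.rstrip()
--             if stripped == open_marker:
--                 decision = ('flip', i)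
--             elif stripped == closed_marker:
--                 decision = ('closed',)
--
--     if decision is not None and decision[0] == 'flip':
--         lines[decision[1]] = closed_marker
--         joined = "\n".join(lines)
--         return joined + "\n" if text.endswith("\n") else joined
--     return text
-- ===== Notes on version B (the rewrite author's own statement) =====
-- stated objective: alternative
-- what changed: A's two passes (an enumerate loop locating the section, then a re-scan of lines[i] over range(section_start+1, section_end)) are fused into one state-machine pass that carries an in_section flag and a per-section recorded decision (none / flip-at-index / closed), reset whenever the heading reappears; the single recorded decision is applied after the loop.
import Mathlib
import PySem

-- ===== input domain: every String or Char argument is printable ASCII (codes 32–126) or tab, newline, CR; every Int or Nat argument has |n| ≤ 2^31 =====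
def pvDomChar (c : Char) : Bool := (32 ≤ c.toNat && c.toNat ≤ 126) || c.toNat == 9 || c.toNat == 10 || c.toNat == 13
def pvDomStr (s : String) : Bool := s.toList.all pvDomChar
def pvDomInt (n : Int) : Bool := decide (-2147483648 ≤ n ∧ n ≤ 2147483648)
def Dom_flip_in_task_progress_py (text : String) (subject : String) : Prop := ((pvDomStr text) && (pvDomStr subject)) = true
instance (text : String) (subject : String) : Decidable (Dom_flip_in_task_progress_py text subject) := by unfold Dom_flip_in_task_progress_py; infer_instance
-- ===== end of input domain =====

-- B fuses A's two passes (find-section, then re-scan by index) into one state-machine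
-- pass over the lines that records the decision as it goes; same results, one traversal.

def pvHeading : String := "## Task Progress"

-- ===== PORT A =====
-- first loop: 'for i, line in enumerate(lines)': returns (section_start, break index or none)
def pvFindA : List String → Nat → Option Nat → Option Nat × Option Nat
  | [], _, st => (st, none)
  | l :: ls, i, st =>
    if PySem.Str.strip l = pvHeading then pvFindA ls (i + 1) (some i)
    else if st.isSome && PySem.Str.startswith l "## " then (st, some i)
    else pvFindA ls (i + 1) st

-- second loop: 'for i in range(section_start+1, section_end)' reading lines[i]
-- (lines[i] is always in range there; the "" default is never used)
def pvScanA (lines : List String) (openM closedM : String) : List Int → Option (Sum Int Unit)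
  | [] => none
  | i :: is =>
    let stripped := PySem.Str.rstrip (PySem.List.pyGetD lines i "")
    if stripped = openM then some (Sum.inl i)
    else if stripped = closedM then some (Sum.inr ())
    else pvScanA lines openM closedM is

def flip_in_task_progress_py (text : String) (subject : String) : String :=
  let openM := "- [ ] " ++ subject
  let closedM := "- [x] " ++ subject
  let lines := PySem.Str.splitlines text
  match pvFindA lines 0 none with
  | (none, _) => text
  | (some s, en) =>
    let e : Int := match en with | some e => (e : Int) | none => (lines.length : Int)
    match pvScanA lines openM closedM (PySem.List.pyRange ((s : Int) + 1) e 1) with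
    | some (Sum.inl i) =>
      let lines2 := PySem.List.pySetD lines i closedM
      let joined := PySem.Str.join "\n" lines2
      if PySem.Str.endswith text "\n" then joined ++ "\n" else joined
    | some (Sum.inr _) => text
    | none => text

-- ===== PORT B =====
inductive PvDec where
  | nil : PvDec
  | flip : Nat → PvDec
  | closed : PvDec
deriving DecidableEq, Repr

-- the single fused pass of Source B: in_section flag + per-section recorded decision
def pvLoopB (openM closedM : String) : List String → Nat → Bool → PvDec → PvDec
  | [], _, _, d => d
  | l :: ls, i, ins, d =>
    if PySem.Str.strip l = pvHeading then pvLoopB openM closedM ls (i + 1) true PvDec.nil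
    else if ins && PySem.Str.startswith l "## " then d
    else if ins && decide (d = PvDec.nil) then
      let stripped := PySem.Str.rstrip l
      let d' := if stripped = openM then PvDec.flip i
                else if stripped = closedM then PvDec.closed else PvDec.nil
      pvLoopB openM closedM ls (i + 1) ins d'
    else pvLoopB openM closedM ls (i + 1) ins d

def flip_in_task_progress_py_alt (text : String) (subject : String) : String :=
  let openM := "- [ ] " ++ subject
  let closedM := "- [x] " ++ subject
  let lines := PySem.Str.splitlines text
  match pvLoopB openM closedM lines 0 false PvDec.nil with
  | PvDec.flip i =>
    let lines2 := lines.set i closedM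
    let joined := PySem.Str.join "\n" lines2
    if PySem.Str.endswith text "\n" then joined ++ "\n" else joined
  | _ => text

-- ===== PRECONDITION & SPEC =====
def Spec_flip_in_task_progress_py (text : String) (subject : String) (out : String) : Prop := out = flip_in_task_progress_py_alt text subject
instance (text : String) (subject : String) (out : String) : Decidable (Spec_flip_in_task_progress_py text subject out) := by unfold Spec_flip_in_task_progress_py; infer_instance

-- ===== CLAIM (what is proved, stated in full; the proofs are below) =====
def Claim_equal_flip_in_task_progress_py : Prop := ∀ (text : String) (subject : String), Dom_flip_in_task_progress_py text subject → Spec_flip_in_task_progress_py text subject (flip_in_task_progress_py text subject)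

-- ===== LEMMAS AND PROOFS =====

-- A's scan result, read as a decision
def pvDecOf : Option (Sum Int Unit) → PvDec
  | none => PvDec.nil
  | some (Sum.inl i) => PvDec.flip i.toNat
  | some (Sum.inr _) => PvDec.closed

def pvScanDec (lines : List String) (openM closedM : String) (a b : Int) : PvDec :=
  pvDecOf (pvScanA lines openM closedM (PySem.List.pyRange a b 1))

theorem pvScanA_append (lines : List String) (openM closedM : String) (xs ys : List Int) :
    pvScanA lines openM closedM (xs ++ ys)
      = match pvScanA lines openM closedM xs with
        | none => pvScanA lines openM closedM ys
        | r => r := by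
  induction xs with
  | nil => simp [pvScanA]
  | cons i is ih =>
    simp only [List.cons_append, pvScanA]
    split_ifs <;> simp [ih]

theorem pvScanA_inl_nonneg (lines : List String) (openM closedM : String) (is : List Int)
    (hnn : ∀ i ∈ is, 0 ≤ i) {j : Int}
    (h : pvScanA lines openM closedM is = some (Sum.inl j)) : 0 ≤ j := by
  induction is with
  | nil => simp [pvScanA] at h
  | cons i is ih =>
    simp only [pvScanA] at h
    split_ifs at h with h1 h2
    · have hij : i = j := by simpa using h
      subst hij
      exact hnn i (by simp)
    · simp at h
    · exact ih (fun x hx => hnn x (by simp [hx])) h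

theorem pvScanDec_snoc (lines : List String) (openM closedM : String) (a b : Int) (hab : a ≤ b) :
    pvScanDec lines openM closedM a (b + 1)
      = match pvScanDec lines openM closedM a b with
        | PvDec.nil =>
          (let stripped := PySem.Str.rstrip (PySem.List.pyGetD lines b "")
           if stripped = openM then PvDec.flip b.toNat
           else if stripped = closedM then PvDec.closed else PvDec.nil)
        | r => r := by
  unfold pvScanDec
  rw [PySem.List.pyRange_one_succ_right hab, pvScanA_append]
  cases hsc : pvScanA lines openM closedM (PySem.List.pyRange a b 1) with
  | none => simp only [pvDecOf, pvScanA]; split_ifs <;> rfl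
  | some r => cases r <;> rfl

-- empty range scans to nil
theorem pvScanDec_self (lines : List String) (openM closedM : String) (a : Int) :
    pvScanDec lines openM closedM a a = PvDec.nil := by
  simp [pvScanDec, PySem.List.pyRange_one_eq_nil (le_refl a), pvScanA, pvDecOf]

-- the fused loop computes exactly what A's two loops compute
theorem pvFusion (openM closedM : String) (lines : List String) :
    ∀ (suf pre : List String) (st : Option Nat) (d : PvDec),
      lines = pre ++ suf →
      (match st with
       | none => d = PvDec.nil
       | some s => s < pre.length ∧ d = pvScanDec lines openM closedM ((s : Int) + 1) (pre.length : Int)) →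
      pvLoopB openM closedM suf pre.length st.isSome d
        = (match pvFindA suf pre.length st with
           | (none, _) => PvDec.nil
           | (some s, none) => pvScanDec lines openM closedM ((s : Int) + 1) (lines.length : Int)
           | (some s, some e) => pvScanDec lines openM closedM ((s : Int) + 1) (e : Int)) := by
  intro suf
  induction suf with
  | nil =>
    intro pre st d hl hinv
    cases st with
    | none => simpa [pvLoopB, pvFindA] using hinv
    | some s =>
      obtain ⟨hs, hd⟩ := hinv
      simp only [pvLoopB, pvFindA]
      rw [hd, hl]; simp
  | cons l ls ih =>
    intro pre st d hl hinv
    have hlenN : (pre ++ [l]).length = pre.length + 1 := by simp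
    have hl' : lines = (pre ++ [l]) ++ ls := by simpa [List.append_assoc] using hl
    by_cases hh : PySem.Str.strip l = pvHeading
    · -- heading line: reset section start and decision
      have hinv' : (match (some pre.length : Option Nat) with
          | none => (PvDec.nil : PvDec) = PvDec.nil
          | some s => s < (pre ++ [l]).length ∧
              (PvDec.nil : PvDec) = pvScanDec lines openM closedM ((s : Int) + 1) ((pre ++ [l]).length : Int)) := by
        refine ⟨by simp, ?_⟩
        have : (((pre ++ [l]).length : Nat) : Int) = (pre.length : Int) + 1 := by
          rw [hlenN]; push_cast; ring
        rw [this]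
        exact (pvScanDec_self lines openM closedM _).symm
      have key := ih (pre ++ [l]) (some pre.length) PvDec.nil hl' hinv'
      rw [hlenN] at key
      simp only [pvLoopB, pvFindA, if_pos hh, Option.isSome_some] at key ⊢
      exact key
    · by_cases hb : (st.isSome && PySem.Str.startswith l "## ") = true
      · -- closing '## ' line: both sides stop
        obtain ⟨s, rfl⟩ : ∃ s, st = some s := by
          cases st with
          | none => simp at hb
          | some s => exact ⟨s, rfl⟩
        obtain ⟨hs, hd⟩ := hinv
        simp only [pvLoopB, pvFindA, if_neg hh, hb, if_true]
        simpa using hd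
      · cases st with
        | none =>
          have hd : d = PvDec.nil := hinv
          subst hd
          have key := ih (pre ++ [l]) none PvDec.nil hl' (by simp)
          rw [hlenN] at key
          simp only [Option.isSome_none] at key ⊢
          simp only [pvLoopB, pvFindA, if_neg hh, Bool.false_and, Bool.false_eq_true,
            if_false] at key ⊢
          exact key
        | some s =>
          obtain ⟨hs, hd⟩ := hinv
          have hsw : PySem.Str.startswith l "## " = false := by simpa using hb
          have hlenZ : (((pre ++ [l]).length : Nat) : Int) = (pre.length : Int) + 1 := by
            rw [hlenN]; push_cast; ring
          have hgl : PySem.List.pyGetD lines ((pre.length : Nat) : Int) "" = l := by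
            rw [PySem.List.pyGetD_natCast, hl]
            simp [List.getD]
          have hab : (s : Int) + 1 ≤ (pre.length : Int) := by exact_mod_cast hs
          have hs' : s < (pre ++ [l]).length := by rw [hlenN]; omega
          have hd2 : (if d = PvDec.nil then
                (if PySem.Str.rstrip l = openM then PvDec.flip pre.length
                 else if PySem.Str.rstrip l = closedM then PvDec.closed else PvDec.nil)
              else d)
              = pvScanDec lines openM closedM ((s : Int) + 1) (((pre ++ [l]).length : Nat) : Int) := by
            rw [hlenZ, pvScanDec_snoc lines openM closedM _ _ hab, ← hd]
            by_cases hn : d = PvDec.nil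
            · subst hn
              simp only [reduceIte]
              rw [hgl]
              split_ifs <;> simp
            · cases d with
              | nil => exact absurd rfl hn
              | flip i => simp
              | closed => simp
          have key := ih (pre ++ [l]) (some s)
              (if d = PvDec.nil then
                 (if PySem.Str.rstrip l = openM then PvDec.flip pre.length
                  else if PySem.Str.rstrip l = closedM then PvDec.closed else PvDec.nil)
               else d) hl' ⟨hs', hd2⟩
          rw [hlenN] at key
          simp only [Option.isSome_some] at key ⊢
          simp only [pvLoopB, pvFindA, if_neg hh, hsw, Bool.and_false, Bool.false_eq_true,
            if_false, Bool.true_and] at key ⊢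
          by_cases hn : d = PvDec.nil
          · subst hn
            simpa using key
          · simp only [hn, decide_false, Bool.false_eq_true, if_false] at key ⊢
            simpa [hn] using key

-- indices produced by A's scan are in the (nonnegative) range, so lines[i] = closed is List.set
theorem pvSetD_eq_set (lines : List String) (c : String) {i : Int} (h : 0 ≤ i) :
    PySem.List.pySetD lines i c = lines.set i.toNat c := by
  simp only [PySem.List.pySetD, PySem.List.pySet?, PySem.List.pyIdx?, if_pos h]
  split_ifs with h2
  · simp
  · simp only [Option.map_none, Option.getD_none]
    exact (List.set_eq_of_length_le (by omega)).symm

-- ===== VERDICT (by name: the statement is the Claim_ definition above) =====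
theorem flip_in_task_progress_py_spec : Claim_equal_flip_in_task_progress_py := by
  intro text subject _
  unfold Spec_flip_in_task_progress_py flip_in_task_progress_py flip_in_task_progress_py_alt
  dsimp only
  generalize PySem.Str.splitlines text = lines
  have hfuse := pvFusion ("- [ ] " ++ subject) ("- [x] " ++ subject) lines lines [] none PvDec.nil (by simp) (by simp)
  simp only [List.length_nil, Option.isSome_none] at hfuse
  cases hfa : pvFindA lines 0 none with
  | mk st en =>
    simp only [hfa] at hfuse ⊢
    cases st with
    | none => simp only [hfuse]
    | some s =>
      cases en with
      | none =>
        simp only [hfuse]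
        cases hsc : pvScanA lines ("- [ ] " ++ subject) ("- [x] " ++ subject) (PySem.List.pyRange ((s : Int) + 1) (lines.length : Int) 1) with
        | none => simp [pvScanDec, hsc, pvDecOf]
        | some r =>
          cases r with
          | inl i =>
            have hnn : (0 : Int) ≤ i := by
              refine pvScanA_inl_nonneg lines _ _ _ ?_ hsc
              intro x hx
              have := (PySem.List.mem_pyRange_one.mp hx).1
              omega
            simp [pvScanDec, hsc, pvDecOf, pvSetD_eq_set lines _ hnn]
          | inr u => simp [pvScanDec, hsc, pvDecOf]
      | some e =>
        simp only [hfuse]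
        cases hsc : pvScanA lines ("- [ ] " ++ subject) ("- [x] " ++ subject) (PySem.List.pyRange ((s : Int) + 1) (e : Int) 1) with
        | none => simp [pvScanDec, hsc, pvDecOf]
        | some r =>
          cases r with
          | inl i =>
            have hnn : (0 : Int) ≤ i := by
              refine pvScanA_inl_nonneg lines _ _ _ ?_ hsc
              intro x hx
              have := (PySem.List.mem_pyRange_one.mp hx).1
              omega
            simp [pvScanDec, hsc, pvDecOf, pvSetD_eq_set lines _ hnn]
          | inr u => simp [pvScanDec, hsc, pvDecOf]
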